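-- pv_equiv track=rewrite | github.com/ChoiSeunghwan-childly/coding-questions | programmers.co.kr/숫자 게임.py | solution
-- ===== SOURCE A (Python) =====
-- def solution(A, B):
--     answer = 0
--
--     A.sort()
--     B.sort()
--     jIndex = 0
--
--     for i in A:
--         for j in range(jIndex, len(B)):
--             if i < B[j]:
--                 answer += 1
--                 B.remove(B[j])
--                 jIndex = j
--                 break
--     return answer
-- ===== SOURCE B (Python) =====
-- def solution(A, B):
--     # single two-pointer greedy pass over the two sorted lists (no mutation of A/B)
--     sa = sorted(A)
--     sb = sorted(B)
--     ans = 0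
--     j = 0
--     for a in sa:
--         while j < len(sb) and sb[j] <= a:
--             j += 1
--         if j < len(sb):
--             ans += 1
--             j += 1
--     return ans
-- ===== Notes on version B (the rewrite author's own statement) =====
-- stated objective: faster
-- what changed: Replaces the nested rescan-from-jIndex loop with in-place list.remove by a single two-pointer merge-style pass over the two sorted lists that never mutates its inputs.
import Mathlib
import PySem

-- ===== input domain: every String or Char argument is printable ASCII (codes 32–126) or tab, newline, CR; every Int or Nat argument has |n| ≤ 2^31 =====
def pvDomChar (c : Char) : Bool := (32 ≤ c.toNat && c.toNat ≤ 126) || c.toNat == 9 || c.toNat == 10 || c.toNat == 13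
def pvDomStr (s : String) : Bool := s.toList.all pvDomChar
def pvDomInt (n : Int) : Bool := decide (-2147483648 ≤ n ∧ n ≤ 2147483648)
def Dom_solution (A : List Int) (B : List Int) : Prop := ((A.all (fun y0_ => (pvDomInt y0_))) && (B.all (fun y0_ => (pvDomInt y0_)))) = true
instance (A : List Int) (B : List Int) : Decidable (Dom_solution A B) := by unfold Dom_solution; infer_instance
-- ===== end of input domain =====

-- B replaces A's nested rescan + list.remove by one two-pointer pass over the sorted lists (asymptotically
-- faster in a timing run); A sorts A and B in place and removes from B — equivalence is about the RETURN value only.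

-- ===== PORT A =====
-- inner loop: `for j in range(jIndex, len(B)): if i < B[j]: …break` — returns the break index and B[j]
def pvFindA (i : Int) (B : List Int) (j : Nat) : Option (Nat × Int) :=
  if _h : j < B.length then
    match PySem.List.pyGet? B (j : Int) with
    | some v => if i < v then some (j, v) else pvFindA i B (j + 1)
    | none => none   -- unreachable: j is in range
  else none
termination_by B.length - j

-- outer loop over sorted A with state (B, jIndex, answer)
def pvOuterA : List Int → List Int → Nat → Int → Int
  | [], _, _, ans => ans
  | i :: rest, B, jIdx, ans =>
    match pvFindA i B jIdx with
    | some (j, v) => pvOuterA rest ((PySem.List.remove? B v).getD B) j (ans + 1)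
        -- `B.remove(B[j])`: remove? never fails here since v = B[j] ∈ B
    | none => pvOuterA rest B jIdx ans

def solution (A : List Int) (B : List Int) : Int :=
  pvOuterA (PySem.List.sorted A (fun x => x) false) (PySem.List.sorted B (fun x => x) false) 0 0

-- ===== PORT B =====
-- `while j < len(sb) and sb[j] <= a: j += 1`
def pvSkipB (sb : List Int) (a : Int) (j : Nat) : Nat :=
  if h : j < sb.length then
    if (PySem.List.pyGet? sb (j : Int)).getD 0 ≤ a then pvSkipB sb a (j + 1) else j
  else j
termination_by sb.length - j

def solution_alt (A : List Int) (B : List Int) : Int :=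
  let sb := PySem.List.sorted B (fun x => x) false
  ((PySem.List.sorted A (fun x => x) false).foldl
    (fun (st : Nat × Int) a =>
      let j := pvSkipB sb a st.1
      if j < sb.length then (j + 1, st.2 + 1) else (j, st.2))
    (0, 0)).2

-- ===== PRECONDITION & SPEC =====
def Spec_solution (A : List Int) (B : List Int) (out : Int) : Prop := out = solution_alt A B
instance (A : List Int) (B : List Int) (out : Int) : Decidable (Spec_solution A B out) := by unfold Spec_solution; infer_instance

-- ===== CLAIM (what is proved, stated in full; the proofs are below) =====
def Claim_equal_solution : Prop := ∀ (A : List Int) (B : List Int), Dom_solution A B → Spec_solution A B (solution A B)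

-- ===== LEMMAS AND PROOFS =====

-- common intermediate: greedy over suffix lists
def pvGreedy : List Int → List Int → Int → Int
  | [], _, ans => ans
  | a :: sa, sbs, ans =>
    match sbs.dropWhile (fun b => b ≤ a) with
    | [] => pvGreedy sa [] ans
    | _ :: rest => pvGreedy sa rest (ans + 1)

theorem pvGreedy_nil (sa : List Int) (ans : Int) : pvGreedy sa [] ans = ans := by
  induction sa with
  | nil => rfl
  | cons a sa ih => simpa [pvGreedy] using ih

theorem pvSkipB_spec (sb : List Int) (a : Int) (j : Nat) :
    pvSkipB sb a j = j + ((sb.drop j).takeWhile (fun b => decide (b ≤ a))).length := by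
  by_cases h : j < sb.length
  · have hd : sb.drop j = sb[j] :: sb.drop (j + 1) := List.drop_eq_getElem_cons h
    have hget : (PySem.List.pyGet? sb (j : Int)).getD 0 = sb[j] := by
      rw [PySem.List.pyGet?_natCast, List.getElem?_eq_getElem h]; rfl
    by_cases hle : sb[j] ≤ a
    · rw [pvSkipB, dif_pos h, hget, if_pos hle, pvSkipB_spec sb a (j + 1)]
      conv_rhs => rw [hd, List.takeWhile_cons_of_pos (by simpa using hle)]
      simp only [List.length_cons]; omega
    · rw [pvSkipB, dif_pos h, hget, if_neg hle]
      conv_rhs => rw [hd, List.takeWhile_cons_of_neg (by simpa using hle)]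
      simp
  · rw [pvSkipB, dif_neg h, List.drop_eq_nil_of_le (Nat.le_of_not_lt h)]
    simp
termination_by sb.length - j

theorem pvFindA_spec (i : Int) (B : List Int) (j : Nat) :
    pvFindA i B j =
      match (B.drop j).dropWhile (fun b => decide (b ≤ i)) with
      | [] => none
      | v :: _ => some (j + ((B.drop j).takeWhile (fun b => decide (b ≤ i))).length, v) := by
  by_cases h : j < B.length
  · have hd : B.drop j = B[j] :: B.drop (j + 1) := List.drop_eq_getElem_cons h
    have hget : PySem.List.pyGet? B (j : Int) = some B[j] := by
      rw [PySem.List.pyGet?_natCast, List.getElem?_eq_getElem h]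
    by_cases hlt : i < B[j]
    · rw [pvFindA, dif_pos h]
      simp only [hget, if_pos hlt]
      conv_rhs => rw [hd, List.dropWhile_cons_of_neg (by simpa using not_le.mpr hlt),
        List.takeWhile_cons_of_neg (by simpa using not_le.mpr hlt)]
      simp
    · have hle : B[j] ≤ i := not_lt.mp hlt
      rw [pvFindA, dif_pos h]
      simp only [hget, if_neg hlt]
      rw [pvFindA_spec i B (j + 1)]
      conv_rhs => rw [hd, List.dropWhile_cons_of_pos (by simpa using hle),
        List.takeWhile_cons_of_pos (by simpa using hle)]
      cases hw : (B.drop (j + 1)).dropWhile (fun b => decide (b ≤ i)) with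
      | nil => simp
      | cons v rest => simp; omega
  · rw [pvFindA, dif_neg h, List.drop_eq_nil_of_le (Nat.le_of_not_lt h)]
    simp
termination_by B.length - j

theorem pvAlt_eq (sa sb : List Int) (j : Nat) (ans : Int) :
    (sa.foldl (fun (st : Nat × Int) a =>
      let j := pvSkipB sb a st.1
      if j < sb.length then (j + 1, st.2 + 1) else (j, st.2)) (j, ans)).2
    = pvGreedy sa (sb.drop j) ans := by
  induction sa generalizing j ans with
  | nil => rfl
  | cons a sa ih =>
    simp only [List.foldl_cons]
    rw [pvSkipB_spec]
    have hsplit : (sb.drop j).takeWhile (fun b => decide (b ≤ a)) ++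
        (sb.drop j).dropWhile (fun b => decide (b ≤ a)) = sb.drop j :=
      List.takeWhile_append_dropWhile
    have hdrop : sb.drop (j + ((sb.drop j).takeWhile (fun b => decide (b ≤ a))).length)
        = (sb.drop j).dropWhile (fun b => decide (b ≤ a)) := by
      have h1 := List.drop_left' (l₁ := (sb.drop j).takeWhile (fun b => decide (b ≤ a)))
        (l₂ := (sb.drop j).dropWhile (fun b => decide (b ≤ a))) rfl
      rw [hsplit] at h1
      rw [← List.drop_drop]
      exact h1
    have hlen := congrArg List.length hsplit
    simp only [List.length_append, List.length_drop] at hlen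
    cases hw : (sb.drop j).dropWhile (fun b => decide (b ≤ a)) with
    | nil =>
      rw [hw] at hdrop hlen
      have hge : ¬ (j + ((sb.drop j).takeWhile (fun b => decide (b ≤ a))).length < sb.length) := by
        simp only [List.length_nil] at hlen; omega
      rw [if_neg hge, ih, hdrop]
      simp only [pvGreedy, hw]
    | cons v rest =>
      rw [hw] at hdrop hlen
      have hlt : j + ((sb.drop j).takeWhile (fun b => decide (b ≤ a))).length < sb.length := by
        simp only [List.length_cons] at hlen; omega
      rw [if_pos hlt, ih]
      have h2 : sb.drop (j + ((sb.drop j).takeWhile (fun b => decide (b ≤ a))).length + 1)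
          = rest := by
        rw [← List.drop_drop, hdrop]
        simp
      rw [h2]
      simp only [pvGreedy, hw]

-- head of a dropWhile result falsifies the predicate
theorem pvDropWhile_head_false {p : Int → Bool} (l : List Int) (v : Int) (rest : List Int)
    (h : l.dropWhile p = v :: rest) : p v = false := by
  induction l with
  | nil => simp [List.dropWhile] at h
  | cons x xs ih =>
    by_cases hp : p x
    · exact ih (by simpa [List.dropWhile, hp] using h)
    · simp only [List.dropWhile, hp] at h
      cases h with
      | _ => simp_all

-- remove of a value absent from the prefix removes exactly the shown occurrence
theorem pvRemove_prefix (pre suf : List Int) (v : Int) (h : ∀ x ∈ pre, x ≠ v) :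
    PySem.List.remove? (pre ++ v :: suf) v = some (pre ++ suf) := by
  induction pre with
  | nil => simp
  | cons x pre ih =>
    have hx : x ≠ v := h x (by simp)
    rw [List.cons_append, PySem.List.remove?_cons_of_ne _ hx,
      ih (fun y hy => h y (by simp [hy]))]
    rfl

theorem pvOuterA_stuck (sa : List Int) (B : List Int) (jIdx : Nat) (ans : Int)
    (h : ∀ a ∈ sa, ∀ x ∈ B.drop jIdx, x ≤ a) :
    pvOuterA sa B jIdx ans = ans := by
  induction sa with
  | nil => rfl
  | cons a sa ih =>
    have hall : (B.drop jIdx).dropWhile (fun b => decide (b ≤ a)) = [] := by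
      rw [List.dropWhile_eq_nil_iff]
      intro x hx; simpa using h a (by simp) x hx
    have hfind : pvFindA a B jIdx = none := by
      rw [pvFindA_spec, hall]
    simp only [pvOuterA, hfind]
    exact ih (fun a' ha' x hx => h a' (by simp [ha']) x hx)

theorem pvA_eq (sa : List Int) (B : List Int) (jIdx : Nat) (ans : Int)
    (hle : jIdx ≤ B.length)
    (hsa : sa.Pairwise (· ≤ ·))
    (hpre : ∀ x ∈ B.take jIdx, ∀ a ∈ sa, x ≤ a) :
    pvOuterA sa B jIdx ans = pvGreedy sa (B.drop jIdx) ans := by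
  induction sa generalizing B jIdx ans with
  | nil => rfl
  | cons i sa ih =>
    have hsa' := (List.pairwise_cons.mp hsa).2
    have hihead := (List.pairwise_cons.mp hsa).1
    cases hw : (B.drop jIdx).dropWhile (fun b => decide (b ≤ i)) with
    | nil =>
      have hfind : pvFindA i B jIdx = none := by rw [pvFindA_spec, hw]
      have hall : ∀ x ∈ B.drop jIdx, x ≤ i := by
        intro x hx
        simpa using (List.dropWhile_eq_nil_iff.mp hw) x hx
      simp only [pvOuterA, hfind, pvGreedy, hw, pvGreedy_nil]
      exact pvOuterA_stuck sa B jIdx ans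
        (fun a ha x hx => le_trans (hall x hx) (hihead a ha))
    | cons v rest =>
      have hfind : pvFindA i B jIdx =
          some (jIdx + ((B.drop jIdx).takeWhile (fun b => decide (b ≤ i))).length, v) := by
        rw [pvFindA_spec, hw]
      have hvi : i < v := by
        have := pvDropWhile_head_false (B.drop jIdx) v rest hw
        simpa using this
      -- decompose B
      have hsplit : (B.drop jIdx).takeWhile (fun b => decide (b ≤ i)) ++ v :: rest
          = B.drop jIdx := by rw [← hw]; exact List.takeWhile_append_dropWhile
      have hB : B = (B.take jIdx ++ (B.drop jIdx).takeWhile (fun b => decide (b ≤ i)))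
          ++ v :: rest := by
        rw [List.append_assoc, hsplit, List.take_append_drop]
      have hprene : ∀ x ∈ B.take jIdx ++ (B.drop jIdx).takeWhile (fun b => decide (b ≤ i)),
          x ≤ i := by
        intro x hx
        rcases List.mem_append.mp hx with hx | hx
        · exact hpre x hx i (by simp)
        · simpa using List.mem_takeWhile_imp hx
      have hrem : PySem.List.remove? B v
          = some ((B.take jIdx ++ (B.drop jIdx).takeWhile (fun b => decide (b ≤ i))) ++ rest) := by
        conv_lhs => rw [hB]
        exact pvRemove_prefix _ _ _
          (fun x hx => ne_of_lt (lt_of_le_of_lt (hprene x hx) hvi))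
      have hlenpre : (B.take jIdx ++ (B.drop jIdx).takeWhile (fun b => decide (b ≤ i))).length
          = jIdx + ((B.drop jIdx).takeWhile (fun b => decide (b ≤ i))).length := by
        simp [List.length_take, Nat.min_eq_left hle]
      simp only [pvOuterA, hfind, hrem, Option.getD_some, pvGreedy, hw]
      rw [ih _ _ _ ?_ hsa' ?_]
      · congr 1
        rw [← hlenpre, List.drop_left]
      · have h3 := hlenpre
        simp only [List.length_append] at h3 ⊢
        omega
      · rw [← hlenpre, List.take_left]
        intro x hx a ha
        rcases List.mem_append.mp hx with hx2 | hx2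
        · exact hpre x hx2 a (by simp [ha])
        · exact le_trans (by simpa using List.mem_takeWhile_imp hx2) (hihead a ha)

-- ===== VERDICT (by name: the statement is the Claim_ definition above) =====
theorem solution_spec : Claim_equal_solution := by
  intro A B _
  unfold Spec_solution solution solution_alt
  rw [pvAlt_eq,
    pvA_eq _ _ _ _ (Nat.zero_le _) (PySem.List.sorted_pairwise A (fun x => x)) (by simp)]
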